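-- pv_equiv track=rewrite | github.com/force-h2020/force-bdss-plugin-gromacs | force_gromacs/io/gromacs_topology_reader.py | _get_molecule_sections
-- ===== SOURCE A (Python) =====
-- def _get_molecule_sections(file_lines):
--     """ Find file location and molecule type of each section
--
--     Parameters
--     ----------
--     file_lines : list of str
--         List containing lines in topology file as strings
--
--     Returns
--     -------
--     mol_sections : list of str
--         List containing relevant lines of topology file for
--         each molecule in self.symbols
--     """
--
--     # Get indices for beginning of sections of all molecule types
--     # in topology
--     mol_indices = [index for index, line in enumerate(file_lines)
--                    if "moleculetype" in line]
--
--     if len(mol_indices) == 0: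
--         raise IOError('Gromacs topology file does not include any'
--                       ' molecule types')
--     mol_sections = []
--     start_indices = mol_indices
--     end_indices = mol_indices[1:] + [None]
--
--     # Extract the relevant lines in the topology file that correspond
--     # to each molecule
--     for start, end in zip(start_indices, end_indices):
--         mol_sections.append(file_lines[start:end])
--
--     return mol_sections
-- ===== SOURCE B (Python) =====
-- def _get_molecule_sections(file_lines):
--     sections = []
--     current = None
--     for line in file_lines:
--         if "moleculetype" in line:
--             if current is not None:
--                 sections.append(current)
--             current = [line]
--         elif current is not None:
--             current.append(line)
--     if current is not None:
--         sections.append(current)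
--     if not sections:
--         raise IOError('Gromacs topology file does not include any'
--                       ' molecule types')
--     return sections
-- ===== Notes on version B (the rewrite author's own statement) =====
-- stated objective: alternative
-- what changed: Replaced the index comprehension + zip of start/end indices + repeated slicing by a single incremental pass that maintains the current section and flushes it when a new 'moleculetype' line starts.
import Mathlib
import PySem

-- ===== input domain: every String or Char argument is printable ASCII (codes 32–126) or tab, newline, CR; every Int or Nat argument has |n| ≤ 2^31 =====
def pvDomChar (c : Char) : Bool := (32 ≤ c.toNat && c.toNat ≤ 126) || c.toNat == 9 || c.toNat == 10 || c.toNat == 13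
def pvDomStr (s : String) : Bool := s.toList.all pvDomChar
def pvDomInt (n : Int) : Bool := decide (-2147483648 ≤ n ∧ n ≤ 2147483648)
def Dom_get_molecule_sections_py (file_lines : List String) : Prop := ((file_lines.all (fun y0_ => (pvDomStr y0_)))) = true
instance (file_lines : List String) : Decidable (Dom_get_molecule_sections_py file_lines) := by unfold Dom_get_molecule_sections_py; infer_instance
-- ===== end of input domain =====

-- B replaces A's index-comprehension + zip-of-start/end-indices + slicing by one incremental
-- pass that maintains the current section and flushes it at each new 'moleculetype' line
-- (objective: alternative decomposition, same cost).

-- ===== PORT A =====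
def get_molecule_sections_py (file_lines : List String) : List (List String) :=
  let mol_indices : List Int :=
    ((PySem.List.enumerate file_lines).filter
      (fun q => PySem.Str.isIn "moleculetype" q.2)).map (fun q => q.1)
  if mol_indices.length = 0 then
    []  -- Python raises IOError here; excluded by Pre_
  else
    let start_indices := mol_indices
    let end_indices : List (Option Int) := (mol_indices.drop 1).map some ++ [none]
    (start_indices.zip end_indices).foldl
      (fun acc se => acc ++ [PySem.List.slice file_lines (some se.1) se.2]) []

-- ===== PORT B =====
def pvAltStep (st : List (List String) × Option (List String)) (line : String) :
    List (List String) × Option (List String) :=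
  if PySem.Str.isIn "moleculetype" line then
    match st.2 with
    | some c => (st.1 ++ [c], some [line])
    | none => (st.1, some [line])
  else
    match st.2 with
    | some c => (st.1, some (c ++ [line]))
    | none => st

def get_molecule_sections_py_alt (file_lines : List String) : List (List String) :=
  let st := file_lines.foldl pvAltStep ([], none)
  match st.2 with
  | some c => st.1 ++ [c]
  | none => st.1  -- 'sections' is empty: Python raises IOError here; excluded by Pre_

-- ===== PRECONDITION & SPEC =====
-- Pre_ excludes exactly the inputs with no line containing "moleculetype", on which
-- both Pythons raise IOError.
def Pre_get_molecule_sections_py (file_lines : List String) : Prop :=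
  ∃ l ∈ file_lines, PySem.Str.isIn "moleculetype" l = true
instance (file_lines : List String) : Decidable (Pre_get_molecule_sections_py file_lines) := by
  unfold Pre_get_molecule_sections_py; infer_instance

def pvWitness_get_molecule_sections_py : List String :=
  ["[ moleculetype ]", "SOL 2", "[ atoms ]"]

def Spec_get_molecule_sections_py (file_lines : List String) (out : List (List String)) : Prop := out = get_molecule_sections_py_alt file_lines
instance (file_lines : List String) (out : List (List String)) : Decidable (Spec_get_molecule_sections_py file_lines out) := by unfold Spec_get_molecule_sections_py; infer_instance

-- ===== CLAIM (what is proved, stated in full; the proofs are below) =====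
def Claim_equal_get_molecule_sections_py : Prop := ∀ (file_lines : List String), Dom_get_molecule_sections_py file_lines → Pre_get_molecule_sections_py file_lines → Spec_get_molecule_sections_py file_lines (get_molecule_sections_py file_lines)

-- ===== LEMMAS AND PROOFS =====

-- the Nat indices of the lines satisfying p, in order
def pvIdx {α : Type} (p : α → Bool) : List α → List Nat
  | [] => []
  | x :: xs => (if p x then [0] else []) ++ (pvIdx p xs).map (· + 1)

-- A's slicing plan, expressed over Nat indices
def pvS {α : Type} (xs : List α) (J : List Nat) : List (List α) :=
  (J.zip ((J.drop 1).map some ++ [none])).map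
    (fun se => match se.2 with
      | some b => (xs.drop se.1).take (b - se.1)
      | none => xs.drop se.1)

-- the common recursive characterisation of both programs
def pvSec {α : Type} (p : α → Bool) : List α → List (List α)
  | [] => []
  | x :: xs =>
    if p x then
      (x :: xs.takeWhile (fun y => !p y)) :: pvSec p (xs.dropWhile (fun y => !p y))
    else pvSec p xs
termination_by xs => xs.length
decreasing_by
  · exact Nat.lt_succ_of_le (List.length_dropWhile_le _ _)
  · simp

theorem pvS_nil {α : Type} (xs : List α) : pvS xs [] = [] := rfl

theorem pvS_single {α : Type} (xs : List α) (a : Nat) : pvS xs [a] = [xs.drop a] := rfl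

theorem pvS_cons₂ {α : Type} (xs : List α) (a b : Nat) (t : List Nat) :
    pvS xs (a :: b :: t) = (xs.drop a).take (b - a) :: pvS xs (b :: t) := rfl

theorem pvIdx_enum (p : String → Bool) (xs : List String) (s : Int) :
    ((PySem.List.enumerate xs s).filter (fun q => p q.2)).map (fun q => q.1)
      = (pvIdx p xs).map (fun n : Nat => s + (n : Int)) := by
  induction xs generalizing s with
  | nil => simp [pvIdx, PySem.List.enumerate_nil]
  | cons x xs ih =>
    rw [PySem.List.enumerate_cons]
    by_cases h : p x
    · simp only [List.filter_cons, h, if_pos, pvIdx, List.map_cons, List.cons_append,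
        List.nil_append]
      rw [ih (s + 1)]
      simp only [List.map_map]
      refine congrArg₂ _ (by push_cast; ring) ?_
      apply List.map_congr_left
      intro a _
      simp only [Function.comp_apply]
      push_cast; ring
    · simp only [List.filter_cons, h, Bool.false_eq_true, if_neg, not_false_iff, pvIdx,
        List.nil_append]
      rw [ih (s + 1)]
      simp only [List.map_map]
      apply List.map_congr_left
      intro a _
      simp only [Function.comp_apply]
      push_cast; ring

theorem pvS_shift {α : Type} (J : List Nat) (x : α) (xs : List α) :
    pvS (x :: xs) (J.map (· + 1)) = pvS xs J := by
  induction J with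
  | nil => rfl
  | cons a t ih =>
    cases t with
    | nil =>
      rw [List.map_cons, List.map_nil, pvS_single, pvS_single, List.drop_succ_cons]
    | cons b t2 =>
      simp only [List.map_cons] at ih ⊢
      rw [pvS_cons₂, pvS_cons₂, ih]
      simp [Nat.succ_sub_succ]

theorem pvA_slices (xs : List String) (J : List Nat) :
    ((J.map (fun n : Nat => (n : Int))).zip
        (((J.map (fun n : Nat => (n : Int))).drop 1).map some ++ [none])).foldl
      (fun acc se => acc ++ [PySem.List.slice xs (some se.1) se.2]) []
      = pvS xs J := by
  rw [PySem.List.foldl_append_singleton_eq_map]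
  induction J with
  | nil => rfl
  | cons a t ih =>
    cases t with
    | nil =>
      simp only [List.nil_append, List.map_cons, List.map_nil, List.drop_succ_cons,
        List.drop_nil, List.zip_cons_cons, List.zip_nil_right, pvS_single]
      rw [PySem.List.slice_from_natCast]
    | cons b t2 =>
      simp only [List.nil_append] at ih ⊢
      rw [show (List.map (fun n : Nat => (n : Int)) (a :: b :: t2))
            = (a : Int) :: List.map (fun n : Nat => (n : Int)) (b :: t2) from rfl]
      rw [show List.drop 1 ((a : Int) :: List.map (fun n : Nat => (n : Int)) (b :: t2))
            = List.map (fun n : Nat => (n : Int)) (b :: t2) from rfl]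
      rw [show List.map (fun n : Nat => (n : Int)) (b :: t2)
            = (b : Int) :: List.map (fun n : Nat => (n : Int)) t2 from rfl]
      rw [List.map_cons, List.cons_append, List.zip_cons_cons, List.map_cons]
      rw [show pvS xs (a :: b :: t2) = (xs.drop a).take (b - a) :: pvS xs (b :: t2) from rfl]
      refine congrArg₂ _ ?_ ih
      show PySem.List.slice xs (some (a : Int)) (some (b : Int)) = _
      rw [PySem.List.slice_natCast]

theorem pvA_bridge (file_lines : List String) :
    get_molecule_sections_py file_lines
      = pvS file_lines (pvIdx (fun l => PySem.Str.isIn "moleculetype" l) file_lines) := by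
  have hM : ((PySem.List.enumerate file_lines 0).filter
        (fun q => PySem.Str.isIn "moleculetype" q.2)).map (fun q => q.1)
      = (pvIdx (fun l => PySem.Str.isIn "moleculetype" l) file_lines).map
          (fun n : Nat => (n : Int)) := by
    rw [pvIdx_enum]
    apply List.map_congr_left
    intro a _
    ring
  unfold get_molecule_sections_py
  rw [hM]
  rcases hJ : pvIdx (fun l => PySem.Str.isIn "moleculetype" l) file_lines with _ | ⟨j, t⟩
  · simp [pvS_nil]
  · rw [if_neg (by simp)]
    exact pvA_slices file_lines (j :: t)

theorem pvIdx_nil_iff {α : Type} (p : α → Bool) (xs : List α) :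
    pvIdx p xs = [] ↔ ∀ y ∈ xs, p y = false := by
  induction xs with
  | nil => simp [pvIdx]
  | cons x xs ih => by_cases h : p x <;> simp [pvIdx, h, ih]

theorem pvIdx_cons_first {α : Type} (p : α → Bool) (xs : List α) (j : Nat) (rest : List Nat)
    (h : pvIdx p xs = j :: rest) :
    xs.takeWhile (fun y => !p y) = xs.take j ∧ xs.dropWhile (fun y => !p y) = xs.drop j := by
  induction xs generalizing j rest with
  | nil => simp [pvIdx] at h
  | cons x xs ih =>
    by_cases hx : p x
    · simp [pvIdx, hx] at h
      simp [hx, ← h.1]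
    · simp [pvIdx, hx] at h
      obtain ⟨j', hj', rest', hrest', hmap⟩ :
          ∃ j', j = j' + 1 ∧ ∃ rest', rest = rest'.map (· + 1) ∧ pvIdx p xs = j' :: rest' := by
        rcases hi : pvIdx p xs with _ | ⟨a, t⟩
        · rw [hi] at h; simp at h
        · rw [hi] at h; simp at h
          exact ⟨a, h.1.symm, t, h.2.symm, rfl⟩
      obtain ⟨htw, hdw⟩ := ih _ _ hmap
      subst hj'
      simp [hx, htw, hdw]

theorem pvSec_dropWhile {α : Type} (p : α → Bool) (xs : List α) :
    pvSec p (xs.dropWhile (fun y => !p y)) = pvSec p xs := by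
  induction xs with
  | nil => simp
  | cons x xs ih =>
    by_cases h : p x
    · simp [h]
    · rw [List.dropWhile_cons]
      simp only [h, Bool.not_false, if_pos]
      rw [ih, pvSec]
      simp [h]

theorem pvS_pvIdx {α : Type} (p : α → Bool) (xs : List α) :
    pvS xs (pvIdx p xs) = pvSec p xs := by
  induction xs with
  | nil => simp [pvS_nil, pvIdx, pvSec]
  | cons x xs ih =>
    by_cases h : p x
    · rcases hi : pvIdx p xs with _ | ⟨j, rest⟩
      · have hall := (pvIdx_nil_iff p xs).1 hi
        rw [pvSec]
        simp only [h, if_pos]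
        have htw : xs.takeWhile (fun y => !p y) = xs :=
          List.takeWhile_eq_self_iff.2 (by intro a ha; simp [hall a ha])
        have hdw : xs.dropWhile (fun y => !p y) = [] :=
          List.dropWhile_eq_nil_iff.2 (by intro a ha; simp [hall a ha])
        simp [pvIdx, h, hi, pvS_single, htw, hdw, pvSec]
      · rw [pvSec]
        simp only [h, if_pos]
        obtain ⟨htw, hdw⟩ := pvIdx_cons_first p xs j rest hi
        have hstep : pvS (x :: xs) (pvIdx p (x :: xs))
            = (x :: xs.take j) :: pvS (x :: xs) ((pvIdx p xs).map (· + 1)) := by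
          simp only [pvIdx, h, if_pos, hi]
          simp [pvS_cons₂, List.take_succ_cons]
        rw [hstep, pvS_shift, ih, htw, hdw, ← pvSec_dropWhile p xs, hdw]
    · rw [pvSec]
      simp only [h, Bool.false_eq_true, if_neg, not_false_iff]
      rw [show pvIdx p (x :: xs) = (pvIdx p xs).map (· + 1) by simp [pvIdx, h],
        pvS_shift, ih]

-- B-side: finishing step and loop invariants
def pvFinish (st : List (List String) × Option (List String)) : List (List String) :=
  match st.2 with
  | some c => st.1 ++ [c]
  | none => st.1

theorem pvB_loop_some (xs : List String) (secs : List (List String)) (cur : List String) :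
    pvFinish (xs.foldl pvAltStep (secs, some cur))
      = secs ++ (cur ++ xs.takeWhile (fun y => !PySem.Str.isIn "moleculetype" y))
          :: pvSec (fun l => PySem.Str.isIn "moleculetype" l)
              (xs.dropWhile (fun y => !PySem.Str.isIn "moleculetype" y)) := by
  induction xs generalizing secs cur with
  | nil => simp [pvFinish, pvSec]
  | cons x xs ih =>
    by_cases h : PySem.Str.isIn "moleculetype" x
    · rw [List.foldl_cons, show pvAltStep (secs, some cur) x = (secs ++ [cur], some [x]) by
        unfold pvAltStep; rw [if_pos h], ih]
      have h' : PySem.Chars.isIn ['m', 'o', 'l', 'e', 'c', 'u', 'l', 'e', 't', 'y', 'p', 'e'] x.toList = true := by simpa using h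
      simp [pvSec, h']
    · rw [List.foldl_cons, show pvAltStep (secs, some cur) x = (secs, some (cur ++ [x])) by
        unfold pvAltStep; rw [if_neg h], ih]
      have h' : PySem.Chars.isIn ['m', 'o', 'l', 'e', 'c', 'u', 'l', 'e', 't', 'y', 'p', 'e'] x.toList = false := by simpa using h
      simp [h']

theorem pvB_loop_none (xs : List String) (secs : List (List String)) :
    pvFinish (xs.foldl pvAltStep (secs, none))
      = secs ++ pvSec (fun l => PySem.Str.isIn "moleculetype" l) xs := by
  induction xs generalizing secs with
  | nil => simp [pvFinish, pvSec]
  | cons x xs ih =>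
    by_cases h : PySem.Str.isIn "moleculetype" x
    · rw [List.foldl_cons, show pvAltStep (secs, none) x = (secs, some [x]) by
        unfold pvAltStep; rw [if_pos h], pvB_loop_some]
      have h' : PySem.Chars.isIn ['m', 'o', 'l', 'e', 'c', 'u', 'l', 'e', 't', 'y', 'p', 'e'] x.toList = true := by simpa using h
      simp [pvSec, h']
    · rw [List.foldl_cons, show pvAltStep (secs, none) x = (secs, none) by
        unfold pvAltStep; rw [if_neg h], ih]
      have h' : PySem.Chars.isIn ['m', 'o', 'l', 'e', 'c', 'u', 'l', 'e', 't', 'y', 'p', 'e'] x.toList = false := by simpa using h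
      simp [pvSec, h']

theorem pvB_eq (file_lines : List String) :
    get_molecule_sections_py_alt file_lines
      = pvSec (fun l => PySem.Str.isIn "moleculetype" l) file_lines := by
  have h := pvB_loop_none file_lines []
  simpa [pvFinish, get_molecule_sections_py_alt] using h

-- ===== VERDICT (by name: the statement is the Claim_ definition above) =====
theorem get_molecule_sections_py_spec : Claim_equal_get_molecule_sections_py := by
  intro file_lines _ _
  unfold Spec_get_molecule_sections_py
  rw [pvA_bridge, pvS_pvIdx, pvB_eq]
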